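-- pv_equiv track=rewrite | github.com/siegfriedd17/rubics-cube-3D | rubic.py | make_face
-- ===== SOURCE A (Python) =====
-- def make_face(div, face):
--     """renvoie les 4 points pour chaque sub face crée"""
--     all_face = []
--     nbr_face = [i for i in range(0,len(face))]
--     for coef in nbr_face:
--         for y in range(div+1):
--             for x in range(div+1):
--                 x1 = x+1
--                 y1 = y+1
--                 rect = (div+2)**2*coef
--                 face = ( ( x+y*(div+2) )+rect, ( x1+y*(div+2) )+rect,
--                         ( x1+y1*(div+2) )+rect,( x+y1*(div+2) )+rect)
--                 all_face.append(face)
--     return all_face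
-- ===== SOURCE B (Python) =====
-- def make_face(div, face):
--     """renvoie les 4 points pour chaque sub face cree"""
--     base = [(x + y * (div + 2), x + 1 + y * (div + 2),
--              x + 1 + (y + 1) * (div + 2), x + (y + 1) * (div + 2))
--             for y in range(div + 1) for x in range(div + 1)]
--     step = (div + 2) ** 2
--     all_face = []
--     for coef in range(len(face)):
--         rect = step * coef
--         all_face.extend((a + rect, b + rect, c + rect, d + rect) for a, b, c, d in base)
--     return all_face
-- ===== Notes on version B (the rewrite author's own statement) =====
-- stated objective: alternative
-- what changed: B precomputes the single-face corner table once and, per face index, extends the output with that table shifted by (div+2)^2*coef, instead of recomputing every corner tuple from x,y,coef inside a triple nested loop.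
import Mathlib
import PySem

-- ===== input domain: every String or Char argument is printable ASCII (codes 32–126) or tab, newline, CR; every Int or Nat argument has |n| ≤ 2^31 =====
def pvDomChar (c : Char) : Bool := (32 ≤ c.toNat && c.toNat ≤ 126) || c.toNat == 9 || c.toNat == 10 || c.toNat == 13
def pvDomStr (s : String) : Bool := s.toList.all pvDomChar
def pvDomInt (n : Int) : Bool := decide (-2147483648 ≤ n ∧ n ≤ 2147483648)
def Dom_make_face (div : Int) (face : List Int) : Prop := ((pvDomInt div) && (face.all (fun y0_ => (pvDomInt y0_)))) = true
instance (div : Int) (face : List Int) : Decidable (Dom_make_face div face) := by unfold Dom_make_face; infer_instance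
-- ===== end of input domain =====

-- B precomputes the single-face corner table once and shifts it per face index; A recomputes each corner tuple inside a triple nested loop. Return values proved equal on all inputs.

-- ===== PORT A =====
def make_face (div : Int) (face : List Int) : List (Int × Int × Int × Int) :=
  let nbr_face := PySem.List.pyRange 0 (face.length : Int) 1
  nbr_face.foldl (fun all_face coef =>
    (PySem.List.pyRange 0 (div + 1) 1).foldl (fun accY y =>
      (PySem.List.pyRange 0 (div + 1) 1).foldl (fun accX x =>
        let x1 := x + 1
        let y1 := y + 1
        let rect := (div + 2) ^ 2 * coef
        accX ++ [((x + y * (div + 2)) + rect, (x1 + y * (div + 2)) + rect,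
                  (x1 + y1 * (div + 2)) + rect, (x + y1 * (div + 2)) + rect)]) accY) all_face) []

-- ===== PORT B =====
def make_face_alt (div : Int) (face : List Int) : List (Int × Int × Int × Int) :=
  let base := (PySem.List.pyRange 0 (div + 1) 1).flatMap (fun y =>
    (PySem.List.pyRange 0 (div + 1) 1).map (fun x =>
      (x + y * (div + 2), x + 1 + y * (div + 2),
       x + 1 + (y + 1) * (div + 2), x + (y + 1) * (div + 2))))
  let step := (div + 2) ^ 2
  (PySem.List.pyRange 0 (face.length : Int) 1).foldl (fun all_face coef =>
    let rect := step * coef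
    all_face ++ base.map (fun t =>
      (t.1 + rect, t.2.1 + rect, t.2.2.1 + rect, t.2.2.2 + rect))) []

-- ===== PRECONDITION & SPEC =====
def Spec_make_face (div : Int) (face : List Int) (out : List (Int × Int × Int × Int)) : Prop := out = make_face_alt div face
instance (div : Int) (face : List Int) (out : List (Int × Int × Int × Int)) : Decidable (Spec_make_face div face out) := by unfold Spec_make_face; infer_instance

-- ===== CLAIM (what is proved, stated in full; the proofs are below) =====
def Claim_equal_make_face : Prop := ∀ (div : Int) (face : List Int), Dom_make_face div face → Spec_make_face div face (make_face div face)

-- ===== LEMMAS AND PROOFS =====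

-- A's inner double loop for one coef appends exactly B's shifted base table
theorem make_face_inner_eq (div coef : Int) (acc : List (Int × Int × Int × Int)) :
    (PySem.List.pyRange 0 (div + 1) 1).foldl (fun accY y =>
      (PySem.List.pyRange 0 (div + 1) 1).foldl (fun accX x =>
        accX ++ [((x + y * (div + 2)) + (div + 2) ^ 2 * coef,
                  (x + 1 + y * (div + 2)) + (div + 2) ^ 2 * coef,
                  (x + 1 + (y + 1) * (div + 2)) + (div + 2) ^ 2 * coef,
                  (x + (y + 1) * (div + 2)) + (div + 2) ^ 2 * coef)]) accY) acc
    = acc ++ ((PySem.List.pyRange 0 (div + 1) 1).flatMap (fun y =>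
        (PySem.List.pyRange 0 (div + 1) 1).map (fun x =>
          (x + y * (div + 2), x + 1 + y * (div + 2),
           x + 1 + (y + 1) * (div + 2), x + (y + 1) * (div + 2))))).map (fun t =>
        (t.1 + (div + 2) ^ 2 * coef, t.2.1 + (div + 2) ^ 2 * coef,
         t.2.2.1 + (div + 2) ^ 2 * coef, t.2.2.2 + (div + 2) ^ 2 * coef)) := by
  rw [List.map_flatMap]
  rw [PySem.List.foldl_congr_mem
      (g := fun accY y => accY ++ ((PySem.List.pyRange 0 (div + 1) 1).map (fun x =>
        (x + y * (div + 2), x + 1 + y * (div + 2),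
         x + 1 + (y + 1) * (div + 2), x + (y + 1) * (div + 2)))).map (fun t =>
        (t.1 + (div + 2) ^ 2 * coef, t.2.1 + (div + 2) ^ 2 * coef,
         t.2.2.1 + (div + 2) ^ 2 * coef, t.2.2.2 + (div + 2) ^ 2 * coef)))]
  · exact PySem.List.foldl_append_eq_flatMap _ _ _
  · intro accY y _
    rw [List.map_map]
    exact PySem.List.foldl_append_singleton_eq_map _ _ _

theorem make_face_spec : Claim_equal_make_face := by
  intro div face _
  unfold Spec_make_face make_face make_face_alt
  simp only []
  apply PySem.List.foldl_congr_mem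
  intro acc coef _
  exact make_face_inner_eq div coef acc
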